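-- pv_equiv track=rewrite | github.com/firestige/Otus | voip-simulator/uac/gen_rtp_pcap.py | pcm16_to_ulaw
-- ===== SOURCE A (Python) =====
-- def pcm16_to_ulaw(sample: int) -> int:
--     """Encode a 16-bit signed PCM sample to 8-bit G.711 μ-law."""
--     BIAS = 0x84
--     CLIP = 32635
--     sample = max(-CLIP, min(CLIP, int(sample)))
--     sign = 0x80 if sample < 0 else 0x00
--     sample = abs(sample) + BIAS
--     exp = 7
--     for exp in range(7, -1, -1):
--         if sample >= (1 << (exp + 4)):
--             break
--     mantissa = (sample >> (exp + 3)) & 0x0F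
--     return (~(sign | (exp << 4) | mantissa)) & 0xFF
-- ===== SOURCE B (Python) =====
-- def pcm16_to_ulaw(sample: int) -> int:
--     """Encode a 16-bit signed PCM sample to 8-bit G.711 mu-law."""
--     sample = int(sample)
--     if sample < 0:
--         sign, mag = 0x80, -sample
--     else:
--         sign, mag = 0x00, sample
--     mag = min(mag, 32635) + 0x84
--     exp = min(7, mag.bit_length() - 5)
--     mantissa = (mag >> (exp + 3)) & 0x0F
--     return 0xFF ^ (sign | (exp << 4) | mantissa)
-- ===== Notes on version B (the rewrite author's own statement) =====
-- stated objective: simpler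
-- what changed: Replaces A's descending exponent-search loop with a closed-form exponent derived from the bit length of the biased magnitude, handles sign/magnitude directly instead of clamp-then-abs, and builds the byte with xor instead of complement-and-mask.
import Mathlib
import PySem

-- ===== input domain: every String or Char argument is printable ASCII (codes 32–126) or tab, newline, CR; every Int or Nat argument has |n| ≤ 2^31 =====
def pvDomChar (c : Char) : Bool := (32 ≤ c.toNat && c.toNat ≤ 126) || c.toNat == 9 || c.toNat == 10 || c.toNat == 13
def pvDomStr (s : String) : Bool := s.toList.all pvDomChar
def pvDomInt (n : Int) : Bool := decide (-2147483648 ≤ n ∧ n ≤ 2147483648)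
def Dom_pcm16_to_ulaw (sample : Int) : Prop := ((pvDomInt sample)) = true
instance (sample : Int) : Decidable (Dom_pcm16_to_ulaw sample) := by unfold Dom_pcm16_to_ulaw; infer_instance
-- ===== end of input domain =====

-- B replaces A's descending exponent-search loop by a closed-form exponent from the bit length
-- of the biased magnitude (objective: simpler).

-- ===== PORT A =====
-- the 'for exp in range(7,-1,-1): if sample >= (1 << (exp+4)): break' loop;
-- the accumulator is the last loop variable value (Python's 'exp' after the loop)
def pcm16_loopA (sample : Int) : List Int → Int → Int
  | [], exp => exp
  | e :: rest, _ =>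
    if sample ≥ (1 <<< (e.toNat + 4) : Int) then e
    else pcm16_loopA sample rest e

def pcm16_to_ulaw (sample : Int) : Int :=
  let s := max (-32635) (min 32635 sample)
  let sign : Int := if s < 0 then 0x80 else 0x00
  let s := |s| + 0x84
  let exp := pcm16_loopA s (PySem.List.pyRange 7 (-1) (-1)) 7
  let mantissa := PySem.Int.band (s >>> (exp.toNat + 3)) 0x0F
  PySem.Int.band (Int.not (PySem.Int.bor sign (PySem.Int.bor (exp <<< (4:Nat)) mantissa))) 0xFF

-- ===== PORT B =====
def pcm16_to_ulaw_alt (sample : Int) : Int :=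
  let sign : Int := if sample < 0 then 0x80 else 0x00
  let mag : Int := if sample < 0 then -sample else sample
  let mag := min mag 32635 + 0x84
  let exp : Int := min 7 ((PySem.Int.bitLength mag : Int) - 5)
  let mantissa := PySem.Int.band (mag >>> (exp.toNat + 3)) 0x0F
  PySem.Int.bxor 0xFF (PySem.Int.bor sign (PySem.Int.bor (exp <<< (4:Nat)) mantissa))

-- ===== PRECONDITION & SPEC =====
def Spec_pcm16_to_ulaw (sample : Int) (out : Int) : Prop := out = pcm16_to_ulaw_alt sample
instance (sample : Int) (out : Int) : Decidable (Spec_pcm16_to_ulaw sample out) := by unfold Spec_pcm16_to_ulaw; infer_instance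

-- ===== CLAIM (what is proved, stated in full; the proofs are below) =====
def Claim_equal_pcm16_to_ulaw : Prop := ∀ (sample : Int), Dom_pcm16_to_ulaw sample → Spec_pcm16_to_ulaw sample (pcm16_to_ulaw sample)

-- ===== LEMMAS AND PROOFS =====

-- a number with its absolute value bracketed by consecutive powers of two has that bit length
theorem bitLength_eq_of (n : Int) (c : Nat) (h1 : 2^(c-1) ≤ n.natAbs) (h2 : n.natAbs < 2^c) :
    PySem.Int.bitLength n = c := by
  have hne : n ≠ 0 := by
    intro h; subst h; simp only [Int.natAbs_zero] at h1; have := Nat.two_pow_pos (c-1); omega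
  have hb1 := PySem.Int.two_pow_bitLength_le n hne
  have hb2 := PySem.Int.lt_two_pow_bitLength n
  have e1 : PySem.Int.bitLength n - 1 < c :=
    (Nat.pow_lt_pow_iff_right (by norm_num)).mp (lt_of_le_of_lt hb1 h2)
  have e2 : c - 1 < PySem.Int.bitLength n :=
    (Nat.pow_lt_pow_iff_right (by norm_num)).mp (lt_of_le_of_lt h1 hb2)
  omega

-- A's search loop agrees with B's closed-form exponent on the biased magnitude range
theorem exp_closed (n : Int) (h1 : 132 ≤ n) (h2 : n ≤ 32767) :
    pcm16_loopA n [7,6,5,4,3,2,1,0] 7 = min 7 ((PySem.Int.bitLength n : Int) - 5) := by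
  have hb2 := PySem.Int.lt_two_pow_bitLength n
  simp only [pcm16_loopA]
  simp only [Int.reduceToNat, Nat.reduceAdd]
  norm_num [Int.shiftLeft_eq, ge_iff_le]
  rcases le_or_gt 2048 n with h | h
  · rw [if_pos (by omega)]
    have : 11 < PySem.Int.bitLength n := by
      refine (Nat.pow_lt_pow_iff_right (a := 2) (by norm_num)).mp (lt_of_le_of_lt ?_ hb2)
      omega
    omega
  rcases le_or_gt 1024 n with h' | h'
  · rw [if_neg (by omega), if_pos (by omega)]
    rw [bitLength_eq_of n 11 (by norm_num; omega) (by norm_num; omega)]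
    norm_num
  rcases le_or_gt 512 n with h'' | h''
  · rw [if_neg (by omega), if_neg (by omega), if_pos (by omega)]
    rw [bitLength_eq_of n 10 (by norm_num; omega) (by norm_num; omega)]
    norm_num
  rcases le_or_gt 256 n with h3 | h3
  · rw [if_neg (by omega), if_neg (by omega), if_neg (by omega), if_pos (by omega)]
    rw [bitLength_eq_of n 9 (by norm_num; omega) (by norm_num; omega)]
    norm_num
  · rw [if_neg (by omega), if_neg (by omega), if_neg (by omega), if_neg (by omega), if_pos (by omega)]
    rw [bitLength_eq_of n 8 (by norm_num; omega) (by norm_num; omega)]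
    norm_num

-- '~x & 0xFF' and '0xFF ^ x' agree on one byte
set_option maxRecDepth 2000 in
theorem not_band_255 : ∀ x : Nat, x < 256 →
    PySem.Int.band (Int.not (x:Int)) 255 = PySem.Int.bxor 255 (x:Int) := by decide

theorem not_band_255_int (x : Int) (h0 : 0 ≤ x) (h : x < 256) :
    PySem.Int.band (Int.not x) 255 = PySem.Int.bxor 255 x := by
  have hx := not_band_255 x.toNat (by omega)
  rwa [show ((x.toNat : Nat) : Int) = x by omega] at hx

theorem shiftRight_toNat (n : Int) (h : 0 ≤ n) (k : Nat) :
    n >>> k = ((n.toNat >>> k : Nat) : Int) := by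
  rw [Int.shiftRight_eq_div_pow, Nat.shiftRight_eq_div_pow]
  rw [show n = (n.toNat : Int) by omega]
  norm_cast

-- the assembled byte sign | (exp << 4) | mantissa lies in [0, 256)
theorem assembled_bounds (n sign : Int) (h1 : 132 ≤ n) (h2 : n ≤ 32767)
    (hs : sign = 0 ∨ sign = 128) :
    0 ≤ PySem.Int.bor sign (PySem.Int.bor ((min 7 ((PySem.Int.bitLength n : Int) - 5)) <<< (4:Nat))
        (PySem.Int.band (n >>> ((min 7 ((PySem.Int.bitLength n : Int) - 5)).toNat + 3)) 15)) ∧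
    PySem.Int.bor sign (PySem.Int.bor ((min 7 ((PySem.Int.bitLength n : Int) - 5)) <<< (4:Nat))
        (PySem.Int.band (n >>> ((min 7 ((PySem.Int.bitLength n : Int) - 5)).toNat + 3)) 15)) < 256 := by
  have hbl : 8 ≤ PySem.Int.bitLength n := by
    have hb2 := PySem.Int.lt_two_pow_bitLength n
    have : 7 < PySem.Int.bitLength n := by
      refine (Nat.pow_lt_pow_iff_right (a := 2) (by norm_num)).mp (lt_of_le_of_lt ?_ hb2)
      omega
    omega
  set bl := PySem.Int.bitLength n with hblv
  have hE : (min 7 ((bl : Int) - 5)) = ((min 7 (bl - 5) : Nat) : Int) := by push_cast; omega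
  rw [hE]
  set e : Nat := min 7 (bl - 5) with he
  have he7 : e ≤ 7 := by omega
  have htn : (((e : Nat) : Int)).toNat = e := by omega
  rw [htn]
  rw [shiftRight_toNat n (by omega) (e + 3)]
  rw [show ((e : Int) <<< (4:Nat)) = ((e <<< 4 : Nat) : Int) by
    simp [Int.shiftLeft_eq, Nat.shiftLeft_eq]]
  rw [show (15 : Int) = ((15 : Nat) : Int) by norm_num]
  rw [PySem.Int.band_natCast, PySem.Int.bor_natCast]
  rcases hs with hs | hs <;> rw [hs]
  · rw [show (0 : Int) = ((0 : Nat) : Int) by norm_num, PySem.Int.bor_natCast]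
    have hX : (0 : Nat) ||| ((e <<< 4) ||| (n.toNat >>> (e + 3) &&& 15)) < 256 := by
      refine Nat.or_lt_two_pow (n := 8) (by norm_num) ?_
      refine Nat.or_lt_two_pow (n := 8) ?_ ?_
      · have : e <<< 4 = e * 16 := by rw [Nat.shiftLeft_eq]
        omega
      · have := Nat.and_lt_two_pow (n.toNat >>> (e + 3)) (show (15:Nat) < 2^4 by norm_num)
        omega
    exact ⟨by positivity, by exact_mod_cast hX⟩
  · rw [show (128 : Int) = ((128 : Nat) : Int) by norm_num, PySem.Int.bor_natCast]
    have hX : (128 : Nat) ||| ((e <<< 4) ||| (n.toNat >>> (e + 3) &&& 15)) < 256 := by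
      refine Nat.or_lt_two_pow (n := 8) (by norm_num) ?_
      refine Nat.or_lt_two_pow (n := 8) ?_ ?_
      · have : e <<< 4 = e * 16 := by rw [Nat.shiftLeft_eq]
        omega
      · have := Nat.and_lt_two_pow (n.toNat >>> (e + 3)) (show (15:Nat) < 2^4 by norm_num)
        omega
    exact ⟨by positivity, by exact_mod_cast hX⟩

-- ===== VERDICT (by name: the statement is the Claim_ definition above) =====
theorem pcm16_to_ulaw_spec : Claim_equal_pcm16_to_ulaw := by
  intro s _
  unfold Spec_pcm16_to_ulaw
  simp only [pcm16_to_ulaw, pcm16_to_ulaw_alt]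
  rw [show PySem.List.pyRange 7 (-1) (-1) = [7,6,5,4,3,2,1,0] from by decide]
  by_cases hs : s < 0
  · rw [if_pos (show max (-32635) (min 32635 s) < 0 by omega), if_pos hs, if_pos hs]
    rw [show |max (-32635) (min 32635 s)| = min (-s) 32635 by
      rw [abs_of_neg (by omega)]; omega]
    rw [exp_closed (min (-s) 32635 + 0x84) (by omega) (by omega)]
    have hb := assembled_bounds (min (-s) 32635 + 0x84) 128 (by omega) (by omega) (Or.inr rfl)
    exact not_band_255_int _ hb.1 hb.2
  · rw [if_neg (show ¬ (max (-32635) (min 32635 s) < 0) by omega), if_neg hs, if_neg hs]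
    rw [show |max (-32635) (min 32635 s)| = min s 32635 by
      rw [abs_of_nonneg (by omega)]; omega]
    rw [exp_closed (min s 32635 + 0x84) (by omega) (by omega)]
    have hb := assembled_bounds (min s 32635 + 0x84) 0 (by omega) (by omega) (Or.inl rfl)
    exact not_band_255_int _ hb.1 hb.2
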